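-- pv_equiv track=rewrite | github.com/lancejames221b/agent-hivemind | src/workflow_haivemind_integration.py | _generate_workflow_name
-- ===== SOURCE A (Python) =====
-- from typing import Any, Dict, List, Optional, Tuple
--
-- def _generate_workflow_name(sequence: List[str], context: Dict[str, Any]) -> str:
--     """Generate a descriptive workflow name"""
--     # Extract key terms from sequence
--     key_terms = []
--     for command in sequence:
--         if 'broadcast' in command:
--             key_terms.append('Communication')
--         elif 'delegate' in command:
--             key_terms.append('Task Assignment')
--         elif 'status' in command:
--             key_terms.append('Status Check')
--         elif 'sync' in command:
--             key_terms.append('Synchronization')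
--         elif 'remember' in command:
--             key_terms.append('Knowledge Storage')
--         elif 'query' in command:
--             key_terms.append('Information Retrieval')
--
--     if key_terms:
--         return f"{' & '.join(key_terms[:2])} Workflow"
--     else:
--         return f"Custom {len(sequence)}-Step Workflow"
-- ===== SOURCE B (Python) =====
-- RULES = [
--     ('broadcast', 'Communication'),
--     ('delegate', 'Task Assignment'),
--     ('status', 'Status Check'),
--     ('sync', 'Synchronization'),
--     ('remember', 'Knowledge Storage'),
--     ('query', 'Information Retrieval'),
-- ]
--
--
-- def _first_label(seq):
--     """First rule label occurring in seq, with the remaining suffix; None if none matches."""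
--     for j, cmd in enumerate(seq):
--         for key, lab in RULES:
--             if key in cmd:
--                 return lab, seq[j + 1:]
--     return None
--
--
-- def _generate_workflow_name(sequence, context):
--     """Generate a descriptive workflow name by two staged searches (no term list, no join)."""
--     first = _first_label(sequence)
--     if first is None:
--         return f'Custom {len(sequence)}-Step Workflow'
--     lab1, rest = first
--     second = _first_label(rest)
--     if second is None:
--         return f'{lab1} Workflow'
--     return f'{lab1} & {second[0]} Workflow'
-- ===== Notes on version B (the rewrite author's own statement) =====
-- stated objective: alternative
-- what changed: Instead of collecting a list of key terms and join-slicing it, B performs two staged searches (find the first matching command's label, then the first in the remaining suffix) and formats the one- or two-label name directly, with the keyword chain as an ordered rules table; no accumulator list and no join.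
import Mathlib
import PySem

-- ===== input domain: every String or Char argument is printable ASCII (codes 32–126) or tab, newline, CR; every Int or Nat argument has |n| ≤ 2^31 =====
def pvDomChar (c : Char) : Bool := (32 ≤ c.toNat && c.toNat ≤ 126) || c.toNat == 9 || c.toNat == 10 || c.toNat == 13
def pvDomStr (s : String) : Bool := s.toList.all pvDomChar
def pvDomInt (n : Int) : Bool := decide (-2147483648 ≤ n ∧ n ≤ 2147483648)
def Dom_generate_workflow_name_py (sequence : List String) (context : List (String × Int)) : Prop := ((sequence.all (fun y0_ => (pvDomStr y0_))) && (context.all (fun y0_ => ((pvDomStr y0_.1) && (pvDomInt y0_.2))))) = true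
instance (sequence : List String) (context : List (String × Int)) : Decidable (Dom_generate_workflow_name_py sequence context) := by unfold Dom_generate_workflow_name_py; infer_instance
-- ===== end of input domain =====

-- B replaces A's collect-then-join-slice pass by two staged searches (first label, then first
-- label of the remaining suffix) and formats the one- or two-label name directly (alternative).

-- ===== PORT A =====
-- the if/elif chain of A: the term appended for one command (none = no branch fires)
def pvClassifyA (command : String) : Option String :=
  if PySem.Str.isIn "broadcast" command then some "Communication"
  else if PySem.Str.isIn "delegate" command then some "Task Assignment"
  else if PySem.Str.isIn "status" command then some "Status Check"
  else if PySem.Str.isIn "sync" command then some "Synchronization"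
  else if PySem.Str.isIn "remember" command then some "Knowledge Storage"
  else if PySem.Str.isIn "query" command then some "Information Retrieval"
  else none

def generate_workflow_name_py (sequence : List String) (context : List (String × Int)) : String :=
  let key_terms := sequence.foldl (fun acc command =>
    match pvClassifyA command with
    | some t => acc ++ [t]
    | none => acc) []
  if !key_terms.isEmpty then
    PySem.Str.join " & " (PySem.List.slice key_terms none (some 2)) ++ " Workflow"
  else
    "Custom " ++ PySem.Int.toStr (sequence.length : Int) ++ "-Step Workflow"

-- ===== PORT B =====
def pvRules : List (String × String) :=
  [("broadcast", "Communication"), ("delegate", "Task Assignment"),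
   ("status", "Status Check"), ("sync", "Synchronization"),
   ("remember", "Knowledge Storage"), ("query", "Information Retrieval")]

-- inner loop of _first_label: first rule whose key occurs in command
def pvFirstRule : List (String × String) → String → Option String
  | [], _ => none
  | (key, lab) :: rest, command =>
    if PySem.Str.isIn key command then some lab else pvFirstRule rest command

-- _first_label: first matching command's label plus the remaining suffix
def pvFirstLabel : List String → Option (String × List String)
  | [] => none
  | cmd :: rest =>
    match pvFirstRule pvRules cmd with
    | some lab => some (lab, rest)
    | none => pvFirstLabel rest

def generate_workflow_name_py_alt (sequence : List String) (context : List (String × Int)) : String :=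
  match pvFirstLabel sequence with
  | none => "Custom " ++ PySem.Int.toStr (sequence.length : Int) ++ "-Step Workflow"
  | some (lab1, rest) =>
    match pvFirstLabel rest with
    | none => lab1 ++ " Workflow"
    | some (lab2, _) => lab1 ++ " & " ++ lab2 ++ " Workflow"

-- ===== PRECONDITION & SPEC =====
def Spec_generate_workflow_name_py (sequence : List String) (context : List (String × Int)) (out : String) : Prop := out = generate_workflow_name_py_alt sequence context
instance (sequence : List String) (context : List (String × Int)) (out : String) : Decidable (Spec_generate_workflow_name_py sequence context out) := by unfold Spec_generate_workflow_name_py; infer_instance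

-- ===== CLAIM =====
def Claim_equal_generate_workflow_name_py : Prop := ∀ (sequence : List String) (context : List (String × Int)), Dom_generate_workflow_name_py sequence context → Spec_generate_workflow_name_py sequence context (generate_workflow_name_py sequence context)

-- ===== LEMMAS AND PROOFS =====

-- the if/elif chain and the table scan pick the same (first) label
lemma classify_eq_firstRule (c : String) : pvClassifyA c = pvFirstRule pvRules c := rfl

-- A's fold, run from any accumulator, appends the flatMap of classify
lemma foldA_eq_flatMap (seq : List String) (acc : List String) :
    seq.foldl (fun acc command =>
      match pvClassifyA command with
      | some t => acc ++ [t]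
      | none => acc) acc = acc ++ seq.flatMap (fun c => (pvClassifyA c).toList) := by
  induction seq generalizing acc with
  | nil => simp
  | cons c rest ih =>
    cases h : pvClassifyA c <;> simp [List.foldl_cons, h, ih]

-- the flatMap of classify, described by B's staged search
lemma flatMap_eq_firstLabel (seq : List String) :
    seq.flatMap (fun c => (pvClassifyA c).toList) =
      match pvFirstLabel seq with
      | none => []
      | some (lab, rest) => lab :: rest.flatMap (fun c => (pvClassifyA c).toList) := by
  induction seq with
  | nil => simp [pvFirstLabel]
  | cons c rest ih =>
    rw [pvFirstLabel]
    cases h : pvFirstRule pvRules c with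
    | none => simpa [List.flatMap_cons, classify_eq_firstRule, h] using ih
    | some lab => simp [List.flatMap_cons, classify_eq_firstRule, h]

-- join " & " on one and two strings
lemma join_one (a : String) : PySem.Str.join " & " [a] = a := by
  simp [PySem.Str.join, String.ofList]

lemma join_two (a b : String) : PySem.Str.join " & " [a, b] = a ++ " & " ++ b := by
  have h : (PySem.Str.join " & " [a, b]).toList = (a ++ " & " ++ b).toList := by
    simp [PySem.Str.toList_join, PySem.Chars.join_cons_cons, PySem.Chars.join_singleton]
  exact String.toList_inj.mp h

-- ===== VERDICT =====
theorem generate_workflow_name_py_spec : Claim_equal_generate_workflow_name_py := by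
  intro sequence context _
  unfold Spec_generate_workflow_name_py generate_workflow_name_py generate_workflow_name_py_alt
  rw [foldA_eq_flatMap]
  simp only [List.nil_append]
  cases h1 : pvFirstLabel sequence with
  | none =>
    have hK : sequence.flatMap (fun c => (pvClassifyA c).toList) = [] := by
      rw [flatMap_eq_firstLabel, h1]
    simp [hK]
  | some p1 =>
    obtain ⟨lab1, rest⟩ := p1
    cases h2 : pvFirstLabel rest with
    | none =>
      have hR : rest.flatMap (fun c => (pvClassifyA c).toList) = [] := by
        rw [flatMap_eq_firstLabel, h2]
      have hK : sequence.flatMap (fun c => (pvClassifyA c).toList) = [lab1] := by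
        rw [flatMap_eq_firstLabel, h1]; simp [hR]
      rw [hK]
      rw [show PySem.List.slice [lab1] none (some 2) = [lab1] from
        PySem.List.slice_to _ (by norm_num)]
      simp [join_one, h2]
    | some p2 =>
      obtain ⟨lab2, rest2⟩ := p2
      have hR : rest.flatMap (fun c => (pvClassifyA c).toList)
          = lab2 :: rest2.flatMap (fun c => (pvClassifyA c).toList) := by
        rw [flatMap_eq_firstLabel, h2]
      have hK : sequence.flatMap (fun c => (pvClassifyA c).toList)
          = lab1 :: lab2 :: rest2.flatMap (fun c => (pvClassifyA c).toList) := by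
        rw [flatMap_eq_firstLabel, h1]; simp [hR]
      rw [hK]
      rw [show PySem.List.slice (lab1 :: lab2 :: rest2.flatMap (fun c => (pvClassifyA c).toList)) none (some 2)
            = (lab1 :: lab2 :: rest2.flatMap (fun c => (pvClassifyA c).toList)).take 2 from
          PySem.List.slice_to _ (by norm_num)]
      simp [join_two, h2]
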